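-- pv_equiv track=rewrite | github.com/thiagovb46/python-index-words | main.py | createsAnIndex
-- ===== SOURCE A (Python) =====
-- def createsAnIndex(treeDimensionsList):
--
--     index = {}
--     for i in range(0,len(treeDimensionsList)):
--         for j in range (0, len(treeDimensionsList[i])):
--             for k in range(0,len(treeDimensionsList[i][j])):
--                 if(treeDimensionsList[i][j][k] in index and (i+1) in index[treeDimensionsList[i][j][k]].keys()):
--                     index[treeDimensionsList[i][j][k]] [i+1] +=1
--                 else:
--                     if(treeDimensionsList[i][j][k] in index):
--                         index[treeDimensionsList[i][j][k]] [i+1] = 1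
--                     else:
--                         index.update({treeDimensionsList[i][j][k]: {i+1: 1 } })
--     return index;
-- ===== SOURCE B (Python) =====
-- def createsAnIndex(treeDimensionsList):
--     # pass 1: the distinct words in global first-occurrence order
--     words = []
--     seen = set()
--     for page in treeDimensionsList:
--         for row in page:
--             for word in row:
--                 if word not in seen:
--                     seen.add(word)
--                     words.append(word)
--     # pass 2: word-major scan — for each word, scan every page once and
--     # record the pages (1-based, ascending) where its count is non-zero
--     index = {}
--     for word in words:
--         index[word] = {
--             i + 1: c
--             for i, page in enumerate(treeDimensionsList)
--             if (c := sum(row.count(word) for row in page))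
--         }
--     return index
-- ===== Notes on version B (the rewrite author's own statement) =====
-- stated objective: alternative
-- what changed: B inverts the traversal: instead of A's single page-major pass incrementing nested dict counters, B first collects the distinct words in first-occurrence order, then for each word scans all pages, computing each page count by summing row.count(word), and writes that word's whole page map at once.
import Mathlib
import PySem

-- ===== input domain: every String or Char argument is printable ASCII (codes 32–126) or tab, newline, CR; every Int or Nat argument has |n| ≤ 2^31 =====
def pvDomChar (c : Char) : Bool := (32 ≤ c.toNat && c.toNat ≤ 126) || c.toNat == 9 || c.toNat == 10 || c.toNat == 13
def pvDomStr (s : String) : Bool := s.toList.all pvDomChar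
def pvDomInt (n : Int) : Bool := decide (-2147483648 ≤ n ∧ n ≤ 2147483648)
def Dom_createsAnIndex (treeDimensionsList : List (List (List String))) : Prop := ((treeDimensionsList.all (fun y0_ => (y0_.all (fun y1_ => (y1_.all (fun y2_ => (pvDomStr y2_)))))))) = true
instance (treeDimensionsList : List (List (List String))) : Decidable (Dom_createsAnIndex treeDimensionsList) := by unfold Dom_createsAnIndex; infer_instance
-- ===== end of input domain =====

-- B inverts the traversal (word-major instead of A's page-major incremental dict building):
-- first the distinct words in first-occurrence order, then per word a scan over all pages;
-- an alternative decomposition, not claimed faster.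

-- ===== PORT A =====
-- one word of page i (0-based): A's three-way branch on 'w in index' / '(i+1) in index[w]'
def stepA (i : Int) (idx : PySem.Dict String (PySem.Dict Int Int)) (w : String) :
    PySem.Dict String (PySem.Dict Int Int) :=
  if idx.contains w && (idx.getD w PySem.Dict.empty).contains (i + 1) then
    idx.insert w ((idx.getD w PySem.Dict.empty).insert (i + 1)
      ((idx.getD w PySem.Dict.empty).getD (i + 1) 0 + 1))
  else
    if idx.contains w then
      idx.insert w ((idx.getD w PySem.Dict.empty).insert (i + 1) 1)
    else
      idx.insert w (PySem.Dict.empty.insert (i + 1) 1)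

def createsAnIndex (treeDimensionsList : List (List (List String))) : List (String × List (Int × Int)) :=
  let index := (PySem.List.enumerate treeDimensionsList 0).foldl
    (fun idx pg => pg.2.foldl (fun idx row => row.foldl (fun idx w => stepA pg.1 idx w) idx) idx)
    PySem.Dict.empty
  index.items.map (fun p => (p.1, p.2.items))

-- ===== PORT B =====
-- pass 1: distinct words in global first-occurrence order (the seen-set + append loop IS PySem.Set.add)
def wordsOf (treeDimensionsList : List (List (List String))) : PySem.Set String :=
  treeDimensionsList.foldl
    (fun acc page => page.foldl (fun acc row => row.foldl (fun acc w => PySem.Set.add acc w) acc) acc)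
    PySem.Set.empty

-- sum(row.count(word) for row in page)
def pageCount (word : String) (page : List (List String)) : Int :=
  (page.map (fun row => (row.count word : Int))).sum

-- the dict comprehension {i+1: c for i, page in enumerate(t) if (c := sum(...))}, as its (page, count) pairs
def pageEntries (treeDimensionsList : List (List (List String))) (word : String) : List (Int × Int) :=
  (PySem.List.enumerate treeDimensionsList 0).filterMap (fun pg =>
    let c := pageCount word pg.2
    if c ≠ 0 then some (pg.1 + 1, c) else none)

def createsAnIndex_alt (treeDimensionsList : List (List (List String))) : List (String × List (Int × Int)) :=
  let index := (wordsOf treeDimensionsList).foldl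
    (fun idx w => idx.insert w
      ((pageEntries treeDimensionsList w).foldl (fun d p => d.insert p.1 p.2) PySem.Dict.empty))
    PySem.Dict.empty
  index.items.map (fun p => (p.1, p.2.items))

-- ===== PRECONDITION & SPEC =====
def Spec_createsAnIndex (treeDimensionsList : List (List (List String))) (out : List (String × List (Int × Int))) : Prop := out = createsAnIndex_alt treeDimensionsList
instance (treeDimensionsList : List (List (List String))) (out : List (String × List (Int × Int))) : Decidable (Spec_createsAnIndex treeDimensionsList out) := by unfold Spec_createsAnIndex; infer_instance

-- ===== CLAIM (what is proved, stated in full; the proofs are below) =====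
def Claim_equal_createsAnIndex : Prop := ∀ (treeDimensionsList : List (List (List String))), Dom_createsAnIndex treeDimensionsList → Spec_createsAnIndex treeDimensionsList (createsAnIndex treeDimensionsList)

-- ===== LEMMAS AND PROOFS =====

theorem dict_items_empty {κ ν : Type} [BEq κ] : (PySem.Dict.empty : PySem.Dict κ ν).items = [] := rfl

-- the collapsed write: idx[w][i+1] = c (insert keeps an existing key's position)
def wr (i : Int) (idx : PySem.Dict String (PySem.Dict Int Int)) (p : String × Int) :
    PySem.Dict String (PySem.Dict Int Int) :=
  idx.insert p.1 ((idx.getD p.1 PySem.Dict.empty).insert (i + 1) p.2)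

theorem stepA_eq_wr (i : Int) (idx : PySem.Dict String (PySem.Dict Int Int)) (w : String) :
    stepA i idx w = wr i idx (w, (idx.getD w PySem.Dict.empty).getD (i + 1) 0 + 1) := by
  unfold stepA wr
  by_cases h : idx.contains w
  · by_cases h2 : (idx.getD w PySem.Dict.empty).contains (i + 1)
    · simp [h, h2]
    · simp only [Bool.not_eq_true] at h2
      simp [h, h2, PySem.Dict.getD_of_not_contains _ _ h2]
  · simp only [Bool.not_eq_true] at h
    simp [h, PySem.Dict.getD_of_not_contains _ _ h, PySem.Dict.getD_empty]

theorem insert_insert_comm_of_contains {d : PySem.Dict String (PySem.Dict Int Int)}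
    {k w : String} (hne : k ≠ w) (hw : d.contains w = true)
    (A B : PySem.Dict Int Int) :
    (d.insert k A).insert w B = (d.insert w B).insert k A := by
  apply PySem.Dict.ext
  have hw' : (d.insert k A).contains w = true := by
    simp [PySem.Dict.contains_insert, hw]
  by_cases hk : d.contains k
  · have hk' : (d.insert w B).contains k = true := by
      simp [PySem.Dict.contains_insert, hk]
    rw [PySem.Dict.items_insert_of_contains _ _ hw', PySem.Dict.items_insert_of_contains _ _ hk,
        PySem.Dict.items_insert_of_contains _ _ hk', PySem.Dict.items_insert_of_contains _ _ hw]
    simp only [List.map_map]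
    apply List.map_congr_left
    intro p _
    by_cases h1 : p.1 = k <;> by_cases h2 : p.1 = w <;>
      simp_all [Function.comp, Ne.symm hne]
  · simp only [Bool.not_eq_true] at hk
    have hk' : (d.insert w B).contains k = false := by
      simp [PySem.Dict.contains_insert, hk, hne]
    rw [PySem.Dict.items_insert_of_contains _ _ hw', PySem.Dict.items_insert_of_not_contains _ _ hk,
        PySem.Dict.items_insert_of_not_contains _ _ hk', PySem.Dict.items_insert_of_contains _ _ hw]
    simp [hne]

theorem wr_overwrite (i : Int) (d : PySem.Dict String (PySem.Dict Int Int)) (w : String) (u v : Int) :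
    wr i (wr i d (w, u)) (w, v) = wr i d (w, v) := by
  simp [wr, PySem.Dict.getD_insert_self, PySem.Dict.insert_insert_self]

theorem wr_comm {i : Int} {d : PySem.Dict String (PySem.Dict Int Int)} {k w : String}
    (hne : k ≠ w) (hw : d.contains w = true) (c v : Int) :
    wr i (wr i d (k, c)) (w, v) = wr i (wr i d (w, v)) (k, c) := by
  simp only [wr]
  rw [PySem.Dict.getD_insert_of_ne _ _ _ (Ne.symm hne), PySem.Dict.getD_insert_of_ne _ _ _ hne]
  exact insert_insert_comm_of_contains hne hw _ _

theorem contains_wr {d : PySem.Dict String (PySem.Dict Int Int)} {w : String}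
    (hw : d.contains w = true) (i : Int) (p : String × Int) :
    (wr i d p).contains w = true := by
  simp [wr, PySem.Dict.contains_insert, hw]

theorem foldl_wr_pull (i : Int) (w : String) (v : Int) :
    ∀ (ps : List (String × Int)) (d : PySem.Dict String (PySem.Dict Int Int)),
      d.contains w = true → w ∉ ps.map Prod.fst →
      wr i (ps.foldl (wr i) d) (w, v) = ps.foldl (wr i) (wr i d (w, v)) := by
  intro ps
  induction ps with
  | nil => intro d _ _; rfl
  | cons p rest ih =>
    intro d hw hnm
    simp only [List.map_cons, List.mem_cons] at hnm
    push Not at hnm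
    obtain ⟨hne, hnm'⟩ := hnm
    simp only [List.foldl_cons]
    rw [ih (wr i d p) (contains_wr hw i p) hnm']
    congr 1
    obtain ⟨k, c⟩ := p
    exact (wr_comm (k := k) (Ne.symm hne) hw c v)

theorem foldl_wr_mid (i : Int) (w : String) (v : Int)
    (ps1 ps2 : List (String × Int)) (d : PySem.Dict String (PySem.Dict Int Int))
    (hw : d.contains w = true) (h1 : w ∉ ps1.map Prod.fst) :
    (ps1 ++ (w, v) :: ps2).foldl (wr i) d = (ps1 ++ ps2).foldl (wr i) (wr i d (w, v)) := by
  rw [List.foldl_append, List.foldl_append, List.foldl_cons,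
      foldl_wr_pull i w v ps1 d hw h1]

theorem page_loop (i : Int) :
    ∀ (ws : List String) (idx : PySem.Dict String (PySem.Dict Int Int)),
      ws.foldl (stepA i) idx =
      ((PySem.Set.ofList ws).map
        (fun w => (w, (idx.getD w PySem.Dict.empty).getD (i + 1) 0 + (ws.count w : Int)))).foldl
        (wr i) idx := by
  intro ws
  induction ws with
  | nil => intro idx; rfl
  | cons w ws ih =>
    intro idx
    set u : Int := (idx.getD w PySem.Dict.empty).getD (i + 1) 0 with hu
    have hstep : stepA i idx w = wr i idx (w, u + 1) := stepA_eq_wr i idx w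
    set idx' : PySem.Dict String (PySem.Dict Int Int) := wr i idx (w, u + 1) with hidx'
    have hval : ∀ k, k ≠ w →
        (idx'.getD k PySem.Dict.empty).getD (i + 1) 0 = (idx.getD k PySem.Dict.empty).getD (i + 1) 0 := by
      intro k hk
      rw [hidx']
      simp only [wr]
      rw [PySem.Dict.getD_insert_of_ne _ _ _ hk]
    have hvalw : (idx'.getD w PySem.Dict.empty).getD (i + 1) 0 = u + 1 := by
      rw [hidx']; simp only [wr]
      rw [PySem.Dict.getD_insert_self, PySem.Dict.getD_insert_self]
    simp only [List.foldl_cons, hstep]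
    rw [ih idx']
    rw [PySem.Set.ofList_cons]
    by_cases hmem : w ∈ ws
    · have hmem' : w ∈ PySem.Set.ofList ws := (PySem.Set.mem_ofList ws w).mpr hmem
      obtain ⟨s1, s2, hsplit⟩ := List.append_of_mem hmem'
      have hnd : (PySem.Set.ofList ws).Nodup := PySem.Set.nodup_ofList ws
      rw [hsplit] at hnd
      have hw1 : w ∉ s1 := by
        intro h; exact (List.disjoint_of_nodup_append hnd) h (List.mem_cons_self)
      have hw2 : w ∉ s2 := by
        have := (List.nodup_append.mp hnd).2.1
        exact (List.nodup_cons.mp this).1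
      rw [hsplit]
      have hf1 : ∀ a ∈ s1, (!(a == w)) = true := by
        intro a ha; have hne : a ≠ w := fun h => hw1 (h ▸ ha); simp [hne]
      have hf2 : ∀ a ∈ s2, (!(a == w)) = true := by
        intro a ha; have hne : a ≠ w := fun h => hw2 (h ▸ ha); simp [hne]
      have hdisc : PySem.Set.discard (s1 ++ w :: s2) w = s1 ++ s2 := by
        simp only [PySem.Set.discard, List.filter_append, List.filter_cons, beq_self_eq_true,
          Bool.not_true, Bool.false_eq_true, if_false]
        rw [List.filter_eq_self.mpr hf1, List.filter_eq_self.mpr hf2]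
      rw [hdisc]
      have hcw : idx'.contains w = true := by
        rw [hidx']; simp only [wr]; exact PySem.Dict.contains_insert_self _ _ _
      have hwm : w ∉ (s1.map
          (fun k => (k, (idx'.getD k PySem.Dict.empty).getD (i + 1) 0 + (ws.count k : Int)))).map Prod.fst := by
        simp only [List.map_map]
        intro h
        obtain ⟨k, hk, hkw⟩ := List.mem_map.mp h
        exact hw1 ((by simpa using hkw) ▸ hk)
      simp only [List.map_append, List.map_cons]
      conv_rhs => rw [List.foldl_cons]
      rw [foldl_wr_mid i w _ _ _ idx' hcw hwm]
      rw [hvalw]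
      have hc : (((w :: ws).count w : Nat) : Int) = (ws.count w : Int) + 1 := by
        simp
      have hadd : u + 1 + (ws.count w : Int) = u + ((ws.count w : Int) + 1) := by ring
      have hover : wr i idx' (w, u + 1 + (ws.count w : Int)) =
          wr i idx (w, u + (((w :: ws).count w : Nat) : Int)) := by
        rw [hidx', wr_overwrite, hc, hadd]
      rw [hover]
      rw [← List.map_append, ← List.map_append]
      congr 1
      apply List.map_congr_left
      intro k hk
      have hkw : k ≠ w := by
        intro h; subst h
        rcases List.mem_append.mp hk with h1 | h2
        · exact hw1 h1
        · exact hw2 h2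
      rw [hval k hkw]
      have hck : (w :: ws).count k = ws.count k := by simp [Ne.symm hkw]
      rw [hck]
    · have hdisc : (PySem.Set.ofList ws).discard w = PySem.Set.ofList ws := by
        apply List.filter_eq_self.mpr
        intro a ha
        have hne : a ≠ w := fun h => hmem ((PySem.Set.mem_ofList ws w).mp (h ▸ ha))
        simp [hne]
      rw [hdisc, List.map_cons, List.foldl_cons]
      have hw1 : ((w :: ws).count w : Int) = 1 := by
        simp [List.count_eq_zero_of_not_mem hmem]
      rw [hw1]
      have : wr i idx (w, u + 1) = idx' := rfl
      rw [this]
      congr 1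
      apply List.map_congr_left
      intro k hk
      have hkw : k ≠ w := fun h => hmem ((PySem.Set.mem_ofList ws w).mp (h ▸ hk))
      rw [hval k hkw]
      have : (w :: ws).count k = ws.count k := by simp [Ne.symm hkw]
      rw [this]

def INV (idx : PySem.Dict String (PySem.Dict Int Int)) (b : Int) : Prop :=
  ∀ (w : String) (j : Int), j ∈ (idx.getD w PySem.Dict.empty).keys → j < b

theorem INV_getD_zero {idx : PySem.Dict String (PySem.Dict Int Int)} {i : Int}
    (h : INV idx (i + 1)) (w : String) :
    (idx.getD w PySem.Dict.empty).getD (i + 1) 0 = 0 := by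
  by_cases hc : (idx.getD w PySem.Dict.empty).contains (i + 1)
  · exact absurd (h w (i + 1) ((PySem.Dict.contains_iff_mem_keys _ _).mp hc)) (lt_irrefl _)
  · simp only [Bool.not_eq_true] at hc
    exact PySem.Dict.getD_of_not_contains _ _ hc

theorem INV_wr {idx : PySem.Dict String (PySem.Dict Int Int)} {b i : Int}
    (h : INV idx b) (hib : i + 1 < b) (p : String × Int) : INV (wr i idx p) b := by
  intro w j hj
  by_cases hw : w = p.1
  · subst hw
    rw [wr, PySem.Dict.getD_insert_self] at hj
    rcases (PySem.Dict.mem_keys_insert _ _ _ _).mp hj with hj1 | hj2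
    · omega
    · exact h p.1 j hj2
  · rw [wr, PySem.Dict.getD_insert_of_ne _ _ _ hw] at hj
    exact h w j hj

theorem INV_foldl_wr {b i : Int} (hib : i + 1 < b) :
    ∀ (ps : List (String × Int)) (idx : PySem.Dict String (PySem.Dict Int Int)),
      INV idx b → INV (ps.foldl (wr i) idx) b := by
  intro ps
  induction ps with
  | nil => intro idx h; exact h
  | cons p rest ih => intro idx h; exact ih _ (INV_wr h hib p)

-- proof-side view of B's per-word entry list, with an arbitrary enumeration start
def entriesFrom (pages : List (List (List String))) (s : Int) (w : String) : List (Int × Int) :=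
  (PySem.List.enumerate pages s).filterMap (fun pg =>
    if (pg.2.flatten.count w : Int) ≠ 0 then some (pg.1 + 1, (pg.2.flatten.count w : Int)) else none)

theorem pageCount_eq (w : String) (page : List (List String)) :
    pageCount w page = (page.flatten.count w : Int) := by
  induction page with
  | nil => simp [pageCount]
  | cons r rs ih =>
    simp only [pageCount, List.map_cons, List.sum_cons, List.flatten_cons, List.count_append] at ih ⊢
    rw [ih]
    push_cast
    ring

theorem pageEntries_eq (t : List (List (List String))) (w : String) :
    pageEntries t w = entriesFrom t 0 w := by
  unfold pageEntries entriesFrom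
  apply List.filterMap_congr
  intro pg _
  simp [pageCount_eq]

theorem entriesFrom_fst_lt (w : String) :
    ∀ (pages : List (List (List String))) (s : Int) (q : Int × Int),
      q ∈ entriesFrom pages s w → s < q.1 := by
  intro pages s q h
  rw [entriesFrom, List.mem_filterMap] at h
  obtain ⟨a, ha, hf⟩ := h
  have h1 : a.1 ∈ (PySem.List.enumerate pages s).map Prod.fst := List.mem_map_of_mem ha
  rw [PySem.List.map_fst_enumerate] at h1
  have h2 := PySem.List.mem_pyRange_one.mp h1
  by_cases hc : ((a.2.flatten.count w : Int) ≠ 0)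
  · rw [if_pos hc] at hf
    injection hf with hf
    subst hf
    show s < a.1 + 1
    omega
  · rw [if_neg hc] at hf
    cases hf

theorem entriesFrom_fst_pairwise (w : String) :
    ∀ (pages : List (List (List String))) (s : Int),
      ((entriesFrom pages s w).map Prod.fst).Pairwise (· < ·) := by
  intro pages
  induction pages with
  | nil => intro s; simp [entriesFrom, PySem.List.enumerate_nil]
  | cons page rest ih =>
    intro s
    rw [entriesFrom, PySem.List.enumerate_cons, List.filterMap_cons]
    by_cases hc : ((page.flatten.count w : Int) ≠ 0)
    · simp only [if_pos hc, List.map_cons]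
      refine List.pairwise_cons.mpr ⟨?_, ih (s + 1)⟩
      intro b hb
      obtain ⟨q, hq, rfl⟩ := List.mem_map.mp hb
      have := entriesFrom_fst_lt w rest (s + 1) q hq
      omega
    · simp only [if_neg hc]
      exact ih (s + 1)

theorem contains_foldl_wr (i : Int) :
    ∀ (ps : List (String × Int)) (idx : PySem.Dict String (PySem.Dict Int Int)) (w : String),
      (ps.foldl (wr i) idx).contains w = (idx.contains w || decide (w ∈ ps.map Prod.fst)) := by
  intro ps
  induction ps with
  | nil => intro idx w; simp
  | cons p rest ih =>
    intro idx w
    rw [List.foldl_cons, ih]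
    simp only [wr, PySem.Dict.contains_insert, List.map_cons, List.mem_cons]
    by_cases h1 : w = p.1 <;> by_cases h2 : w ∈ rest.map Prod.fst <;> simp [h1, h2]

theorem nodup_keys_foldl_wr (i : Int) (ps : List (String × Int))
    (idx : PySem.Dict String (PySem.Dict Int Int)) (h : idx.keys.Nodup) :
    (ps.foldl (wr i) idx).keys.Nodup := by
  have hwr : wr i = fun (d : PySem.Dict String (PySem.Dict Int Int)) (x : String × Int) =>
      d.insert x.1 ((d.getD x.1 PySem.Dict.empty).insert (i + 1) x.2) := rfl
  rw [hwr]
  exact PySem.Dict.nodup_keys_foldl_insert_key ps Prod.fst _ idx h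

theorem wrfold_items (s : Int) (cfun : String → Int) :
    ∀ (W : List String), W.Nodup →
    ∀ (idx : PySem.Dict String (PySem.Dict Int Int)), idx.keys.Nodup →
      ((W.map (fun w => (w, cfun w))).foldl (wr s) idx).items =
        idx.items.map (fun p => (p.1, if p.1 ∈ W then p.2.insert (s + 1) (cfun p.1) else p.2))
        ++ (W.filter (fun w => !idx.contains w)).map
            (fun w => (w, (PySem.Dict.empty.insert (s + 1) (cfun w) : PySem.Dict Int Int))) := by
  intro W
  induction W with
  | nil =>
    intro _ idx _
    simp
  | cons w W' ih =>
    intro hnd idx hk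
    obtain ⟨hwW', hndW'⟩ := List.nodup_cons.mp hnd
    rw [List.map_cons, List.foldl_cons]
    have hk1 : (wr s idx (w, cfun w)).keys.Nodup := nodup_keys_foldl_wr s [(w, cfun w)] idx hk
    by_cases hc : idx.contains w
    · have hitems : (wr s idx (w, cfun w)).items =
          idx.items.map (fun p => if (p.1 == w) = true
            then (w, (idx.getD w PySem.Dict.empty).insert (s + 1) (cfun w)) else p) :=
        PySem.Dict.items_insert_of_contains _ _ hc
      rw [ih hndW' _ hk1, hitems]
      congr 1
      · rw [List.map_map]
        apply List.map_congr_left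
        intro p hp
        by_cases hpw : p.1 = w
        · have hgd : idx.getD p.1 PySem.Dict.empty = p.2 := by
            obtain ⟨a, b⟩ := p
            exact PySem.Dict.getD_of_mem_items idx hp hk _
          rw [hpw] at hgd
          simp [Function.comp, hpw, hwW', hgd]
        · simp [Function.comp, hpw, List.mem_cons]
      · rw [List.filter_cons_of_neg (by simp [hc])]
        have h3 : W'.filter (fun a => !(wr s idx (w, cfun w)).contains a)
            = W'.filter (fun a => !idx.contains a) := by
          apply List.filter_congr
          intro a ha
          have hne : a ≠ w := fun h => hwW' (h ▸ ha)
          simp [wr, PySem.Dict.contains_insert, hne]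
        rw [h3]
    · simp only [Bool.not_eq_true] at hc
      have hg : idx.getD w PySem.Dict.empty = PySem.Dict.empty :=
        PySem.Dict.getD_of_not_contains _ _ hc
      have hitems : (wr s idx (w, cfun w)).items =
          idx.items ++ [(w, (PySem.Dict.empty.insert (s + 1) (cfun w) : PySem.Dict Int Int))] := by
        rw [wr]
        simp only [hg]
        exact PySem.Dict.items_insert_of_not_contains _ _ hc
      rw [ih hndW' _ hk1, hitems, List.map_append]
      have h1 : idx.items.map (fun p => (p.1, if p.1 ∈ W' then p.2.insert (s + 1) (cfun p.1) else p.2))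
          = idx.items.map (fun p => (p.1, if p.1 ∈ w :: W' then p.2.insert (s + 1) (cfun p.1) else p.2)) := by
        apply List.map_congr_left
        intro p hp
        have hpw : p.1 ≠ w := by
          intro h
          have hmem : p.1 ∈ idx.keys := PySem.Dict.mem_keys_of_mem_items idx hp
          have : idx.contains p.1 = true := (PySem.Dict.contains_iff_mem_keys _ _).mpr hmem
          rw [h, hc] at this
          cases this
        simp [List.mem_cons, hpw]
      have h2 : [( (w : String), (PySem.Dict.empty.insert (s + 1) (cfun w) : PySem.Dict Int Int))].map
            (fun p => (p.1, if p.1 ∈ W' then p.2.insert (s + 1) (cfun p.1) else p.2))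
          = [(w, (PySem.Dict.empty.insert (s + 1) (cfun w) : PySem.Dict Int Int))] := by
        simp [hwW']
      have h3 : W'.filter (fun a => !(wr s idx (w, cfun w)).contains a)
          = W'.filter (fun a => !idx.contains a) := by
        apply List.filter_congr
        intro a ha
        have hne : a ≠ w := fun h => hwW' (h ▸ ha)
        simp [wr, PySem.Dict.contains_insert, hne]
      rw [h1, h2, h3, List.filter_cons_of_pos (by simp [hc]), List.map_cons, List.append_assoc]
      rfl

theorem foldl_add_eq (ys : List String) :
    ∀ (t : PySem.Set String),
      ys.foldl PySem.Set.add t = t ++ (PySem.Set.ofList ys).filter (fun w => !List.contains t w) := by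
  induction ys with
  | nil => intro t; simp [PySem.Set.ofList]
  | cons y ys ih =>
    intro t
    rw [List.foldl_cons, ih, PySem.Set.ofList_cons]
    have hdf : ∀ (q : String → Bool) (l : List String),
        List.filter q (PySem.Set.discard l y) = List.filter (fun a => q a && !(a == y)) l := by
      intro q l
      simp only [PySem.Set.discard]
      rw [List.filter_filter]
    by_cases hc : List.contains t y
    · have hyt : y ∈ t := by simpa using hc
      have hadd : PySem.Set.add t y = t := by
        simp [PySem.Set.add, PySem.Set.contains, hyt]
      rw [hadd, List.filter_cons_of_neg (by simp [hyt]), hdf]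
      congr 1
      apply List.filter_congr
      intro a _
      by_cases hay : a = y
      · simp [hay, hyt]
      · simp [hay]
    · simp only [Bool.not_eq_true] at hc
      have hyt : y ∉ t := by simpa using hc
      have hadd : PySem.Set.add t y = t ++ [y] := by
        simp [PySem.Set.add, PySem.Set.contains, hyt]
      rw [hadd, List.filter_cons_of_pos (by simp [hyt]), hdf, List.append_assoc]
      congr 1
      rw [List.singleton_append]
      congr 1
      apply List.filter_congr
      intro a _
      by_cases hay : a = y
      · simp [hay, hyt]
      · simp [hay]

theorem ofList_append_filter (p : String → Bool) (xs ys : List String) :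
    (PySem.Set.ofList (xs ++ ys)).filter p =
      (PySem.Set.ofList xs).filter p
      ++ (PySem.Set.ofList ys).filter (fun w => p w && !(xs.contains w)) := by
  rw [PySem.Set.ofList_eq_foldl, List.foldl_append, ← PySem.Set.ofList_eq_foldl, foldl_add_eq,
      List.filter_append, List.filter_filter]
  congr 1
  apply List.filter_congr
  intro a _
  have hmm : List.contains (PySem.Set.ofList xs) a = List.contains xs a := by
    by_cases h : a ∈ xs
    · have h2 : a ∈ PySem.Set.ofList xs := (PySem.Set.mem_ofList xs a).mpr h
      simp [h, h2]
    · have h2 : a ∉ PySem.Set.ofList xs := fun hh => h ((PySem.Set.mem_ofList xs a).mp hh)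
      simp [h, h2]
  rw [hmm]

-- the main induction: A's whole fold characterised against entriesFrom
theorem main_loop :
    ∀ (pages : List (List (List String))) (s : Int) (idx : PySem.Dict String (PySem.Dict Int Int)),
      idx.keys.Nodup → INV idx (s + 1) →
      (((PySem.List.enumerate pages s).foldl
          (fun idx pg => pg.2.foldl (fun idx row => row.foldl (fun idx w => stepA pg.1 idx w) idx) idx)
          idx).items.map (fun p => (p.1, p.2.items))) =
        idx.items.map (fun p => (p.1, p.2.items ++ entriesFrom pages s p.1))
        ++ ((PySem.Set.ofList pages.flatten.flatten).filter (fun w => !idx.contains w)).map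
            (fun w => (w, entriesFrom pages s w)) := by
  intro pages
  induction pages with
  | nil =>
    intro s idx hk hinv
    simp [PySem.List.enumerate_nil, entriesFrom]
  | cons page rest ih =>
    intro s idx hk hinv
    have hmemW : ∀ w : String, (w ∈ PySem.Set.ofList page.flatten) ↔ ((page.flatten.count w : Int) ≠ 0) := by
      intro w
      rw [PySem.Set.mem_ofList]
      simp [Int.natCast_eq_zero, List.count_eq_zero]
    have hE : ∀ w, entriesFrom (page :: rest) s w =
        (if (page.flatten.count w : Int) ≠ 0
          then [((s : Int) + 1, (page.flatten.count w : Int))] else [])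
          ++ entriesFrom rest (s + 1) w := by
      intro w
      rw [entriesFrom, PySem.List.enumerate_cons, List.filterMap_cons]
      by_cases hc : ((page.flatten.count w : Int) ≠ 0)
      · simp only [if_pos hc]
        rfl
      · simp only [if_neg hc]
        rfl
    rw [PySem.List.enumerate_cons, List.foldl_cons]
    have hbody : page.foldl (fun idx row => row.foldl (fun idx w => stepA s idx w) idx) idx
        = (((PySem.Set.ofList page.flatten).map
            (fun w => (w, (page.flatten.count w : Int)))).foldl (wr s) idx) := by
      rw [← List.foldl_flatten, page_loop]
      congr 1
      apply List.map_congr_left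
      intro w _
      rw [INV_getD_zero hinv, zero_add]
    rw [hbody]
    set idx' := (((PySem.Set.ofList page.flatten).map
        (fun w => (w, (page.flatten.count w : Int)))).foldl (wr s) idx) with hidx'
    have hk' : idx'.keys.Nodup := nodup_keys_foldl_wr s _ idx hk
    have hinv' : INV idx' (s + 1 + 1) := by
      apply INV_foldl_wr (by omega)
      intro w j hj
      have := hinv w j hj
      omega
    rw [ih (s + 1) idx' hk' hinv']
    have hitems := wrfold_items s (fun w => (page.flatten.count w : Int))
      (PySem.Set.ofList page.flatten) (PySem.Set.nodup_ofList page.flatten) idx hk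
    rw [hidx', hitems, List.map_append, List.map_map, List.map_map]
    -- RHS flatten split
    have hflat : ((page :: rest).flatten).flatten = page.flatten ++ rest.flatten.flatten := by
      rw [List.flatten_cons, List.flatten_append]
    rw [hflat, ofList_append_filter, List.map_append, ← List.append_assoc]
    congr 1
    congr 1
    · -- existing entries
      apply List.map_congr_left
      intro p hp
      simp only [Function.comp]
      by_cases hpw : p.1 ∈ PySem.Set.ofList page.flatten
      · have hcnt : (page.flatten.count p.1 : Int) ≠ 0 := (hmemW p.1).mp hpw
        have hgd : idx.getD p.1 PySem.Dict.empty = p.2 := by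
          obtain ⟨a, b⟩ := p
          exact PySem.Dict.getD_of_mem_items idx hp hk _
        have hfree : p.2.contains (s + 1) = false := by
          by_contra hcon
          rw [Bool.not_eq_false] at hcon
          have hmem := (PySem.Dict.contains_iff_mem_keys _ _).mp hcon
          rw [← hgd] at hmem
          have := hinv p.1 (s + 1) hmem
          omega
        rw [if_pos hpw, hE p.1, if_pos hcnt]
        simp [PySem.Dict.items_insert_of_not_contains _ _ hfree]
      · have hcnt : ¬ ((page.flatten.count p.1 : Int) ≠ 0) := fun h => hpw ((hmemW p.1).mpr h)
        rw [if_neg hpw, hE p.1, if_neg hcnt]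
        simp
    · -- words new in this page
      apply List.map_congr_left
      intro w hw
      have hwW : w ∈ PySem.Set.ofList page.flatten := (List.mem_filter.mp hw).1
      have hcnt : (page.flatten.count w : Int) ≠ 0 := (hmemW w).mp hwW
      simp only [Function.comp]
      rw [hE w, if_pos hcnt]
      have hfree : (PySem.Dict.empty : PySem.Dict Int Int).contains (s + 1) = false :=
        PySem.Dict.contains_empty _
      simp [PySem.Dict.items_insert_of_not_contains _ _ hfree, dict_items_empty]
    · -- words first seen later
      have hpred : ((PySem.Set.ofList rest.flatten.flatten).filter (fun w => !idx'.contains w))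
          = ((PySem.Set.ofList rest.flatten.flatten).filter
              (fun w => (!idx.contains w) && !(page.flatten.contains w))) := by
        apply List.filter_congr
        intro a _
        rw [hidx', contains_foldl_wr, List.map_map]
        have hfst : ((PySem.Set.ofList page.flatten).map
            (Prod.fst ∘ fun w => (w, (page.flatten.count w : Int)))) = PySem.Set.ofList page.flatten := by
          rw [show (Prod.fst ∘ fun w : String => (w, (page.flatten.count w : Int)))
                = fun w : String => w from rfl]
          simp
        rw [hfst]
        have hc1 : (decide (a ∈ PySem.Set.ofList page.flatten)) = List.contains page.flatten a := by
          cases hx : List.contains page.flatten a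
          · have hxm : a ∉ page.flatten := by simpa using hx
            have hns : a ∉ PySem.Set.ofList page.flatten := fun hh => hxm ((PySem.Set.mem_ofList _ _).mp hh)
            exact decide_eq_false hns
          · have hxm : a ∈ page.flatten := by simpa using hx
            exact decide_eq_true ((PySem.Set.mem_ofList page.flatten a).mpr hxm)
        rw [hc1]
        simp [Bool.not_or]
      rw [hpred]
      apply List.map_congr_left
      intro w hw
      have hnp : w ∉ page.flatten := by
        have h2 := (List.mem_filter.mp hw).2
        simp only [Bool.and_eq_true, Bool.not_eq_true'] at h2
        simpa using h2.2
      have hcnt : ¬ ((page.flatten.count w : Int) ≠ 0) := by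
        simp [Int.natCast_eq_zero, List.count_eq_zero, hnp]
      rw [hE w, if_neg hcnt, List.nil_append]

theorem wordsOf_eq (t : List (List (List String))) :
    wordsOf t = PySem.Set.ofList t.flatten.flatten := by
  rw [PySem.Set.ofList_eq_foldl, List.foldl_flatten, List.foldl_flatten]
  rfl

theorem alt_items (t : List (List (List String))) :
    createsAnIndex_alt t =
      (PySem.Set.ofList t.flatten.flatten).map (fun w => (w, entriesFrom t 0 w)) := by
  rw [createsAnIndex_alt]
  have hinner : ∀ w, ((pageEntries t w).foldl
      (fun d p => d.insert p.1 p.2) PySem.Dict.empty).items = pageEntries t w := by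
    intro w
    have hnd : ((pageEntries t w).map Prod.fst).Nodup := by
      rw [pageEntries_eq]
      exact (entriesFrom_fst_pairwise w t 0).imp (fun h => ne_of_lt h)
    have hfresh : ∀ a ∈ pageEntries t w,
        (PySem.Dict.empty : PySem.Dict Int Int).contains a.1 = false :=
      fun a _ => PySem.Dict.contains_empty _
    have h := PySem.Dict.items_foldl_insert_fresh (l := pageEntries t w) (k := Prod.fst)
      (v := Prod.snd) (d := PySem.Dict.empty) hfresh hnd
    simpa [dict_items_empty] using h
  have houter := PySem.Dict.items_foldl_insert_fresh (l := wordsOf t) (k := fun w => w)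
    (v := fun w => ((pageEntries t w).foldl (fun d p => d.insert p.1 p.2) PySem.Dict.empty))
    (d := PySem.Dict.empty)
    (fun a _ => PySem.Dict.contains_empty _)
    (by rw [wordsOf_eq]; simpa using PySem.Set.nodup_ofList t.flatten.flatten)
  simp only at houter
  rw [houter]
  simp only [dict_items_empty, List.nil_append, List.map_map]
  rw [wordsOf_eq]
  apply List.map_congr_left
  intro w _
  simp only [Function.comp]
  rw [hinner w, pageEntries_eq]

-- ===== VERDICT (by name: the statement is the Claim_ definition above) =====
theorem createsAnIndex_spec : Claim_equal_createsAnIndex := by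
  intro t _
  unfold Spec_createsAnIndex createsAnIndex
  rw [alt_items]
  have h := main_loop t 0 PySem.Dict.empty (by simp)
      (fun w j hj => by rw [PySem.Dict.getD_empty, PySem.Dict.keys_empty] at hj; cases hj)
  simpa [dict_items_empty, PySem.Dict.contains_empty] using h
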